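-- pv_equiv track=rewrite | github.com/BinaryBand/adrift | runbook/quality/validate_configs.py | _podcast_entry_spans
-- ===== SOURCE A (Python) =====
-- def _podcast_entry_spans(lines: list[str]) -> list[tuple[int, int]]:
--     starts = [i for i, line in enumerate(lines, start=1) if line.strip() == "[[podcasts]]"]
--     if not starts:
--         return []
--     spans: list[tuple[int, int]] = []
--     for idx, start in enumerate(starts):
--         end = starts[idx + 1] - 1 if idx + 1 < len(starts) else len(lines)
--         spans.append((start, end))
--     return spans
-- ===== SOURCE B (Python) =====
-- def _podcast_entry_spans(lines: list[str]) -> list[tuple[int, int]]: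
--     spans: list[tuple[int, int]] = []
--     prev = None
--     for i, line in enumerate(lines, start=1):
--         if line.strip() == "[[podcasts]]":
--             if prev is not None:
--                 spans.append((prev, i - 1))
--             prev = i
--     if prev is not None:
--         spans.append((prev, len(lines)))
--     return spans
-- ===== Notes on version B (the rewrite author's own statement) =====
-- stated objective: simpler
-- what changed: Replaces A's two phases (collect all marker positions, then a second indexed loop reading starts[idx+1]) with one fused pass over the lines that keeps only the previous marker's line number and emits each span as soon as the next marker (or the end) is seen.
import Mathlib
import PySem

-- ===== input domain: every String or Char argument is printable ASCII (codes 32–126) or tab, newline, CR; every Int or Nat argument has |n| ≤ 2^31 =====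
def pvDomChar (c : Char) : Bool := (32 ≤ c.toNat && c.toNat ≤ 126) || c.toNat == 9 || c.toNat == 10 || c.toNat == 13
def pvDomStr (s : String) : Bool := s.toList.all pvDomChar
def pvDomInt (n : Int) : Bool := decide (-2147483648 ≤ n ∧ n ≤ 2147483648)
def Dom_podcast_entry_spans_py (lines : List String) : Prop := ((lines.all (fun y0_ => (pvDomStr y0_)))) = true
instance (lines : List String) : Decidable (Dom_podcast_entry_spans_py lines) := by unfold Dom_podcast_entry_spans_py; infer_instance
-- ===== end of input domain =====

-- B is a single fused pass keeping only the previous marker's line number, instead of A's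
-- collect-all-positions list followed by a second indexed pairing loop; same O(n) cost.

-- ===== PORT A =====
-- the 'for idx, start in enumerate(starts)' loop of A, with the index-based lookahead starts[idx+1]
def pesALoop (starts : List Int) (n : Int) (idx : Nat) (spans : List (Int × Int)) : List (Int × Int) :=
  if h : idx < starts.length then
    let start := starts[idx]
    let ed := if idx + 1 < starts.length then starts.getD (idx + 1) 0 - 1 else n
    pesALoop starts n (idx + 1) (spans ++ [(start, ed)])
  else spans
termination_by starts.length - idx

def podcast_entry_spans_py (lines : List String) : List (Int × Int) :=
  let starts := (PySem.List.enumerate lines 1).foldl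
    (fun acc p => if PySem.Str.strip p.2 = "[[podcasts]]" then acc ++ [p.1] else acc) []
  if starts = [] then []
  else pesALoop starts (lines.length : Int) 0 []

-- ===== PORT B =====
-- the fused single pass: prev = previous marker's line (None initially), spans accumulated
def pesBLoop (n : Int) : List (Int × String) → Option Int → List (Int × Int) → List (Int × Int)
  | [], prev, spans =>
    match prev with
    | none => spans
    | some p => spans ++ [(p, n)]
  | (i, line) :: rest, prev, spans =>
    if PySem.Str.strip line = "[[podcasts]]" then
      pesBLoop n rest (some i)
        (match prev with
         | none => spans
         | some p => spans ++ [(p, i - 1)])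
    else pesBLoop n rest prev spans

def podcast_entry_spans_py_alt (lines : List String) : List (Int × Int) :=
  pesBLoop (lines.length : Int) (PySem.List.enumerate lines 1) none []

-- ===== PRECONDITION & SPEC =====
def Spec_podcast_entry_spans_py (lines : List String) (out : List (Int × Int)) : Prop := out = podcast_entry_spans_py_alt lines
instance (lines : List String) (out : List (Int × Int)) : Decidable (Spec_podcast_entry_spans_py lines out) := by unfold Spec_podcast_entry_spans_py; infer_instance

-- ===== CLAIM (what is proved, stated in full; the proofs are below) =====
def Claim_equal_podcast_entry_spans_py : Prop := ∀ (lines : List String), Dom_podcast_entry_spans_py lines → Spec_podcast_entry_spans_py lines (podcast_entry_spans_py lines)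

-- ===== LEMMAS AND PROOFS =====

-- canonical description of the marker positions of `ls`, 1 line numbered `i`
def pesStartsFrom : List String → Int → List Int
  | [], _ => []
  | l :: ls, i =>
    if PySem.Str.strip l = "[[podcasts]]" then i :: pesStartsFrom ls (i + 1)
    else pesStartsFrom ls (i + 1)

-- canonical pairing of consecutive marker positions (last one paired with n)
def pesPairUp : List Int → Int → List (Int × Int)
  | [], _ => []
  | [s], n => [(s, n)]
  | s :: t :: rest, n => (s, t - 1) :: pesPairUp (t :: rest) n

theorem pesStarts_eq (ls : List String) (i : Int) (acc : List Int) :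
    (PySem.List.enumerate ls i).foldl
      (fun acc p => if PySem.Str.strip p.2 = "[[podcasts]]" then acc ++ [p.1] else acc) acc
    = acc ++ pesStartsFrom ls i := by
  induction ls generalizing i acc with
  | nil => simp [PySem.List.enumerate_nil, pesStartsFrom]
  | cons l ls ih =>
    rw [PySem.List.enumerate_cons]
    simp only [List.foldl_cons, pesStartsFrom]
    split_ifs with h <;> simp [ih, List.append_assoc]

theorem pesALoop_eq (starts : List Int) (n : Int) (idx : Nat) (spans : List (Int × Int))
    (hidx : idx ≤ starts.length) :
    pesALoop starts n idx spans = spans ++ pesPairUp (starts.drop idx) n := by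
  by_cases h : idx < starts.length
  · have hdrop : starts.drop idx = starts[idx] :: starts.drop (idx + 1) :=
      List.drop_eq_getElem_cons h
    rw [pesALoop]
    simp only [h, dif_pos]
    rw [pesALoop_eq starts n (idx + 1) _ (by omega)]
    by_cases h2 : idx + 1 < starts.length
    · have hdrop2 : starts.drop (idx + 1) = starts[idx + 1] :: starts.drop (idx + 2) :=
        List.drop_eq_getElem_cons h2
      have hgd : starts.getD (idx + 1) 0 = starts[idx + 1] := List.getD_eq_getElem _ _ h2
      rw [hdrop, hdrop2, if_pos h2, hgd]
      simp [pesPairUp, ← hdrop2, List.append_assoc]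
    · have hdrop2 : starts.drop (idx + 1) = [] := by
        apply List.drop_eq_nil_of_le; omega
      rw [hdrop, hdrop2, if_neg h2]
      simp [pesPairUp]
  · have : idx = starts.length := by omega
    rw [pesALoop]
    simp [this, List.drop_length, pesPairUp]
termination_by starts.length - idx

theorem pesBLoop_eq (ls : List String) (n : Int) (i : Int) (prev : Option Int)
    (spans : List (Int × Int)) :
    pesBLoop n (PySem.List.enumerate ls i) prev spans
      = spans ++ pesPairUp ((prev.elim [] (fun p => [p])) ++ pesStartsFrom ls i) n := by
  induction ls generalizing i prev spans with
  | nil =>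
    cases prev <;> simp [PySem.List.enumerate_nil, pesBLoop, pesStartsFrom, pesPairUp]
  | cons l ls ih =>
    rw [PySem.List.enumerate_cons]
    simp only [pesBLoop, pesStartsFrom]
    split_ifs with h
    · cases prev with
      | none => simpa using ih (i + 1) (some i) spans
      | some p =>
        rw [ih (i + 1) (some i)]
        simp [pesPairUp]
    · exact ih (i + 1) prev spans

-- ===== VERDICT (by name: the statement is the Claim_ definition above) =====
theorem podcast_entry_spans_py_spec : Claim_equal_podcast_entry_spans_py := by
  intro lines _
  unfold Spec_podcast_entry_spans_py podcast_entry_spans_py podcast_entry_spans_py_alt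
  rw [pesStarts_eq, pesBLoop_eq]
  simp only [List.nil_append, Option.elim]
  split_ifs with h
  · simp [h, pesPairUp]
  · rw [pesALoop_eq _ _ _ _ (by omega)]
    simp
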